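-- pv_equiv track=rewrite | github.com/shadowkael/some_single_py | cut_repeat.py | arcs_cut_repeat
-- ===== SOURCE A (Python) =====
-- def arcs_cut_repeat(arcs_list):
--     new_arcs_list = list()
--     pop_list = list()
--
--     for index_out, arc_out in enumerate(arcs_list):
--         arc_item = list()
--         arc_item.extend(arc_out)
--         for index_inner, arc_inner in enumerate(arcs_list[index_out + 1:]):
--             if (index_inner + 1 + index_out) in pop_list:
--                 continue
--             if arc_out[0] == arc_inner[0] and arc_out[1] == arc_inner[1]:
--                 arc_item[2] = int(arc_item[2] + arc_inner[2])
--                 pop_list.append(index_inner + index_out + 1)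
--         if index_out not in pop_list:
--             new_arcs_list.append(arc_item)
--     return new_arcs_list
-- ===== SOURCE B (Python) =====
-- def arcs_cut_repeat(arcs_list):
--     new_arcs_list = []
--     pending = list(arcs_list)
--     while pending:
--         first = pending[0]
--         rest = pending[1:]
--         item = list(first)
--         for arc in rest:
--             if arc[0] == first[0] and arc[1] == first[1]:
--                 item[2] = int(item[2] + arc[2])
--         new_arcs_list.append(item)
--         pending = [arc for arc in rest
--                    if not (arc[0] == first[0] and arc[1] == first[1])]
--     return new_arcs_list
-- ===== Notes on version B (the rewrite author's own statement) =====
-- stated objective: alternative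
-- what changed: A scans the tail of every index with a shared pop_list of marked duplicate indices and suppresses marked entries on emission; B keeps no index bookkeeping at all: it repeatedly takes the head of a shrinking work-list, merges the same-endpoint arcs into it, and filters them out before the next round.
import Mathlib
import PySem

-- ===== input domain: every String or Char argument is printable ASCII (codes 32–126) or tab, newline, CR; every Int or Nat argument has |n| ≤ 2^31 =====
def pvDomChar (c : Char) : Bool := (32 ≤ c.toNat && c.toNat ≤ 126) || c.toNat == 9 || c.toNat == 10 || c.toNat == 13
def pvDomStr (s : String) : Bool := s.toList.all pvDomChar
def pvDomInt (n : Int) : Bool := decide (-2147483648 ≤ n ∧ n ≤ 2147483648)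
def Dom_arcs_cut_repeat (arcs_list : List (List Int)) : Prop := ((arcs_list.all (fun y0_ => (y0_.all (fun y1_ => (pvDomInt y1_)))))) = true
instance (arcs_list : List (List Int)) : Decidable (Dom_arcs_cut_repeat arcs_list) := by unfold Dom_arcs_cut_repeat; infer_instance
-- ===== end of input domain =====

-- B replaces A's index-marking nested scans (pop_list) with a shrinking work-list: take the head,
-- merge same-endpoint arcs into it, filter them out, repeat (alternative decomposition, same cost class).

-- shared helper of both ports: arc[i] for a literal nonnegative index; Python raises IndexError
-- out of range (PySem.List.pyGet? = none there, excluded by Pre_; the .getD 0 default is never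
-- reached inside Pre_).
def pvGetI (a : List Int) (i : Int) : Int := (PySem.List.pyGet? a i).getD 0

-- ===== PORT A =====

-- inner for-loop over enumerate(arcs_list[index_out+1:]) with global index j = index_inner+1+index_out;
-- state = (arc_item, pop_list).  arc_item[2] = int(...) : int() is identity on int; the index-2
-- assignment is List.set (Python raises on arcs shorter than 3, excluded by Pre_).
def pvA_inner (a : List Int) (j : Nat) (rest : List (List Int))
    (item : List Int) (popl : List Int) : List Int × List Int :=
  match rest with
  | [] => (item, popl)
  | b :: r =>
    if ((j : Int) ∈ popl) then pvA_inner a (j+1) r item popl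
    else if pvGetI a 0 = pvGetI b 0 ∧ pvGetI a 1 = pvGetI b 1 then
      pvA_inner a (j+1) r (item.set 2 (pvGetI item 2 + pvGetI b 2)) (popl ++ [(j : Int)])
    else pvA_inner a (j+1) r item popl

-- outer for-loop over enumerate(arcs_list): suffix = arcs_list[i:]; arc_item starts as a copy of arc_out;
-- new_arcs_list is accumulated by the recursion.
def pvA_outer (i : Nat) (suffix : List (List Int)) (popl : List Int) : List (List Int) :=
  match suffix with
  | [] => []
  | a :: rest =>
    let p := pvA_inner a (i+1) rest a popl
    (if (i : Int) ∈ p.2 then [] else [p.1]) ++ pvA_outer (i+1) rest p.2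

def arcs_cut_repeat (arcs_list : List (List Int)) : List (List Int) :=
  pvA_outer 0 arcs_list []

-- ===== PORT B =====
-- arc[0] == first[0] and arc[1] == first[1]
def pvB_same (first arc : List Int) : Bool :=
  (pvGetI arc 0 == pvGetI first 0) && (pvGetI arc 1 == pvGetI first 1)

-- the for-loop of Source B: fold item through rest, merging matching arcs (item[2] = int(item[2]+arc[2]))
def pvB_fold (first item : List Int) (rest : List (List Int)) : List Int :=
  match rest with
  | [] => item
  | arc :: r =>
    pvB_fold first
      (if pvB_same first arc then item.set 2 (pvGetI item 2 + pvGetI arc 2) else item) r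

-- the while-loop of Source B: head, merge, filter, repeat
def arcs_cut_repeat_alt (arcs_list : List (List Int)) : List (List Int) :=
  match arcs_list with
  | [] => []
  | first :: rest =>
    pvB_fold first first rest ::
      arcs_cut_repeat_alt (rest.filter (fun arc => !pvB_same first arc))
termination_by arcs_list.length
decreasing_by
  simp only [List.length_cons, List.length_unattach]
  exact Nat.lt_succ_of_le (le_trans (List.length_filter_le _ _) (by simp))

-- ===== PRECONDITION & SPEC =====
-- Pre_ is exactly where the Python A returns: with ≥ 2 arcs every arc needs an element 0, arcs whose
-- element 0 coincides need an element 1, and arcs whose first two elements coincide need a weight at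
-- index 2 — otherwise A (and B alike) raises IndexError.
def Pre_arcs_cut_repeat (arcs_list : List (List Int)) : Prop :=
  arcs_list.length ≤ 1 ∨
  ((∀ a ∈ arcs_list, 1 ≤ a.length) ∧
   arcs_list.Pairwise (fun a b =>
     (a.getD 0 0 = b.getD 0 0 → 2 ≤ a.length ∧ 2 ≤ b.length) ∧
     (a.getD 0 0 = b.getD 0 0 ∧ a.getD 1 0 = b.getD 1 0 → 3 ≤ a.length ∧ 3 ≤ b.length)))
instance (arcs_list : List (List Int)) : Decidable (Pre_arcs_cut_repeat arcs_list) := by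
  unfold Pre_arcs_cut_repeat; infer_instance

def pvWitness_arcs_cut_repeat : List (List Int) := [[1, 2, 3], [1, 2, 4], [0, 2, 5]]

def Spec_arcs_cut_repeat (arcs_list : List (List Int)) (out : List (List Int)) : Prop := out = arcs_cut_repeat_alt arcs_list
instance (arcs_list : List (List Int)) (out : List (List Int)) : Decidable (Spec_arcs_cut_repeat arcs_list out) := by unfold Spec_arcs_cut_repeat; infer_instance

-- ===== CLAIM (what is proved, stated in full; the proofs are below) =====
def Claim_equal_arcs_cut_repeat : Prop := ∀ (arcs_list : List (List Int)), Dom_arcs_cut_repeat arcs_list → Pre_arcs_cut_repeat arcs_list → Spec_arcs_cut_repeat arcs_list (arcs_cut_repeat arcs_list)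

-- ===== LEMMAS AND PROOFS =====

-- the merge key of an arc (elements 0 and 1, as A and B read them)
def pvKey (a : List Int) : Int × Int := (pvGetI a 0, pvGetI a 1)

theorem pvB_same_eq (f b : List Int) : pvB_same f b = decide (pvKey b = pvKey f) := by
  simp [pvB_same, pvKey, Prod.ext_iff, Bool.beq_eq_decide_eq, Bool.decide_and]

-- A's inner loop is a no-op when the outer arc's key was already emitted (all its duplicates are marked).
theorem pvA_inner_noop (K : List (Int × Int)) (a : List Int) (hK : pvKey a ∈ K) :
    ∀ (rest : List (List Int)) (j : Nat) (item popl : List Int),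
      (∀ t (h : t < rest.length), ((j + t : Nat) : Int) ∈ popl ↔ pvKey rest[t] ∈ K) →
      pvA_inner a j rest item popl = (item, popl) := by
  intro rest
  induction rest with
  | nil => intro j item popl _; rfl
  | cons b r ih =>
    intro j item popl inv
    have h0 := inv 0 (by simp)
    simp at h0
    have invr : ∀ t (h : t < r.length), (((j+1) + t : Nat) : Int) ∈ popl ↔ pvKey r[t] ∈ K := by
      intro t h
      have e : j + (t + 1) = j + 1 + t := by omega
      have := inv (t + 1) (by simpa using Nat.succ_lt_succ h)
      simpa [e] using this
    by_cases hb : pvKey b ∈ K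
    · simp only [pvA_inner, if_pos (h0.mpr hb)]
      exact ih (j+1) item popl invr
    · have hne : ¬ (pvGetI a 0 = pvGetI b 0 ∧ pvGetI a 1 = pvGetI b 1) := by
        intro ⟨e0, e1⟩
        exact hb (by simpa [pvKey, e0, e1] using hK)
      simp only [pvA_inner, if_neg (fun hj => hb (h0.mp hj)), if_neg hne]
      exact ih (j+1) item popl invr

-- A's inner loop at a first-occurrence arc computes B's merge fold over the not-yet-emitted arcs,
-- and marks exactly the same-key arcs.
theorem pvA_inner_eq (K : List (Int × Int)) (a : List Int) (_hK : pvKey a ∉ K) :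
    ∀ (rest : List (List Int)) (j : Nat) (item popl : List Int),
      (∀ t (h : t < rest.length), ((j + t : Nat) : Int) ∈ popl ↔ pvKey rest[t] ∈ K) →
      ∃ popl',
        pvA_inner a j rest item popl
          = (pvB_fold a item (rest.filter (fun b => !decide (pvKey b ∈ K))), popl') ∧
        (∀ x : Int, x < (j : Nat) → (x ∈ popl' ↔ x ∈ popl)) ∧
        (∀ t (h : t < rest.length),
          (((j + t : Nat) : Int) ∈ popl' ↔ (pvKey rest[t] ∈ K ∨ pvKey rest[t] = pvKey a))) := by
  intro rest
  induction rest with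
  | nil =>
    intro j item popl _
    exact ⟨popl, rfl, fun x _ => Iff.rfl, fun t h => by simp at h⟩
  | cons b r ih =>
    intro j item popl inv
    have h0 := inv 0 (by simp)
    simp at h0
    by_cases hb : pvKey b ∈ K
    · -- b was already merged into an earlier item: A skips it, B's filter drops it
      have invr : ∀ t (h : t < r.length), (((j+1) + t : Nat) : Int) ∈ popl ↔ pvKey r[t] ∈ K := by
        intro t h
        have e : j + (t + 1) = j + 1 + t := by omega
        have := inv (t + 1) (by simpa using Nat.succ_lt_succ h)
        simpa [e] using this
      obtain ⟨popl', heq, hlt, hinv⟩ := ih (j+1) item popl invr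
      have hfil : List.filter (fun x => !decide (pvKey x ∈ K)) (b :: r)
          = List.filter (fun x => !decide (pvKey x ∈ K)) r := by simp [hb]
      refine ⟨popl', ?_, ?_, ?_⟩
      · rw [show pvA_inner a j (b :: r) item popl = pvA_inner a (j+1) r item popl from
          by simp [pvA_inner, h0.mpr hb], hfil]
        exact heq
      · intro x hx; exact hlt x (by push_cast; omega)
      · intro t h
        match t with
        | 0 =>
          simp only [Nat.add_zero, List.getElem_cons_zero]
          have hj : ((j : Nat) : Int) ∈ popl' ↔ ((j : Nat) : Int) ∈ popl := hlt _ (by push_cast; omega)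
          rw [hj, h0]
          exact ⟨Or.inl, fun _ => hb⟩
        | t + 1 =>
          have e : j + (t + 1) = j + 1 + t := by omega
          have := hinv t (by simpa using Nat.lt_of_succ_lt_succ h)
          simpa [e] using this
    · have hjp : ((j : Nat) : Int) ∉ popl := fun hj => hb (h0.mp hj)
      by_cases hkey : pvKey b = pvKey a
      · -- same endpoints: A merges and marks j; B merges (filter keeps b since pvKey b = pvKey a ∉ K)
        have invr : ∀ t (h : t < r.length),
            (((j+1) + t : Nat) : Int) ∈ (popl ++ [(j : Int)]) ↔ pvKey r[t] ∈ K := by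
          intro t h
          have e : j + (t + 1) = j + 1 + t := by omega
          have hne : (((j+1) + t : Nat) : Int) ≠ (j : Int) := by push_cast; omega
          have := inv (t + 1) (by simpa using Nat.succ_lt_succ h)
          simp only [List.mem_append, List.mem_singleton, hne, or_false]
          simpa [e] using this
        obtain ⟨popl', heq, hlt, hinv⟩ :=
          ih (j+1) (item.set 2 (pvGetI item 2 + pvGetI b 2)) (popl ++ [(j : Int)]) invr
        have hcond : pvGetI a 0 = pvGetI b 0 ∧ pvGetI a 1 = pvGetI b 1 := by
          have := hkey; simp [pvKey, Prod.ext_iff] at this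
          exact ⟨this.1.symm, this.2.symm⟩
        have hfil : List.filter (fun x => !decide (pvKey x ∈ K)) (b :: r)
            = b :: List.filter (fun x => !decide (pvKey x ∈ K)) r := by simp [hb]
        refine ⟨popl', ?_, ?_, ?_⟩
        · rw [show pvA_inner a j (b :: r) item popl
              = pvA_inner a (j+1) r (item.set 2 (pvGetI item 2 + pvGetI b 2)) (popl ++ [(j : Int)]) from
            by simp [pvA_inner, hjp, hcond], hfil, heq]
          simp [pvB_fold, pvB_same_eq, hkey]
        · intro x hx
          have := hlt x (by push_cast at hx ⊢; omega)
          rw [this]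
          simp only [List.mem_append, List.mem_singleton]
          constructor
          · rintro (h' | h') ; exact h' ; omega
          · exact Or.inl
        · intro t h
          match t with
          | 0 =>
            simp only [Nat.add_zero, List.getElem_cons_zero]
            have hj : ((j : Nat) : Int) ∈ popl' ↔ ((j : Nat) : Int) ∈ popl ++ [(j : Int)] :=
              hlt _ (by push_cast; omega)
            rw [hj]
            simp [hkey]
          | t + 1 =>
            have e : j + (t + 1) = j + 1 + t := by omega
            have := hinv t (by simpa using Nat.lt_of_succ_lt_succ h)
            simpa [e] using this
      · -- different key, not marked: A skips, B keeps b in the work list but the fold leaves item alone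
        have invr : ∀ t (h : t < r.length), (((j+1) + t : Nat) : Int) ∈ popl ↔ pvKey r[t] ∈ K := by
          intro t h
          have e : j + (t + 1) = j + 1 + t := by omega
          have := inv (t + 1) (by simpa using Nat.succ_lt_succ h)
          simpa [e] using this
        obtain ⟨popl', heq, hlt, hinv⟩ := ih (j+1) item popl invr
        have hcond : ¬ (pvGetI a 0 = pvGetI b 0 ∧ pvGetI a 1 = pvGetI b 1) := by
          intro ⟨e0, e1⟩; exact hkey (by simp [pvKey, e0, e1])
        have hfil : List.filter (fun x => !decide (pvKey x ∈ K)) (b :: r)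
            = b :: List.filter (fun x => !decide (pvKey x ∈ K)) r := by simp [hb]
        refine ⟨popl', ?_, ?_, ?_⟩
        · rw [show pvA_inner a j (b :: r) item popl = pvA_inner a (j+1) r item popl from
            by simp [pvA_inner, hjp, hcond], hfil, heq]
          simp [pvB_fold, pvB_same_eq, hkey]
        · intro x hx; exact hlt x (by push_cast at hx ⊢; omega)
        · intro t h
          match t with
          | 0 =>
            simp only [Nat.add_zero, List.getElem_cons_zero]
            have hj : ((j : Nat) : Int) ∈ popl' ↔ ((j : Nat) : Int) ∈ popl := hlt _ (by push_cast; omega)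
            rw [hj, h0]
            exact ⟨Or.inl, fun h' => h'.elim id (fun he => absurd he hkey)⟩
          | t + 1 =>
            have e : j + (t + 1) = j + 1 + t := by omega
            have := hinv t (by simpa using Nat.lt_of_succ_lt_succ h)
            simpa [e] using this

-- A's outer loop, started with a mark list matching an emitted-key set K, equals B run on the
-- arcs whose key is not in K.
theorem pvA_outer_eq :
    ∀ (suffix : List (List Int)) (i : Nat) (popl : List Int) (K : List (Int × Int)),
      (∀ t (h : t < suffix.length), ((i + t : Nat) : Int) ∈ popl ↔ pvKey suffix[t] ∈ K) →
      pvA_outer i suffix popl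
        = arcs_cut_repeat_alt (suffix.filter (fun b => !decide (pvKey b ∈ K))) := by
  intro suffix
  induction suffix with
  | nil => intro i popl K _; simp [pvA_outer, arcs_cut_repeat_alt]
  | cons a rest ih =>
    intro i popl K inv
    have h0 := inv 0 (by simp)
    simp at h0
    have invr : ∀ t (h : t < rest.length), (((i+1) + t : Nat) : Int) ∈ popl ↔ pvKey rest[t] ∈ K := by
      intro t h
      have e : i + (t + 1) = i + 1 + t := by omega
      have := inv (t + 1) (by simpa using Nat.succ_lt_succ h)
      simpa [e] using this
    by_cases hK : pvKey a ∈ K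
    · -- a is a duplicate of an emitted key: A emits nothing, B's filter drops it
      have hnoop := pvA_inner_noop K a hK rest (i+1) a popl invr
      have hfil : List.filter (fun b => !decide (pvKey b ∈ K)) (a :: rest)
          = List.filter (fun b => !decide (pvKey b ∈ K)) rest := by simp [hK]
      rw [show pvA_outer i (a :: rest) popl = pvA_outer (i+1) rest popl from
        by simp [pvA_outer, hnoop, h0.mpr hK], hfil]
      exact ih (i+1) popl K invr
    · obtain ⟨popl', heq, hlt, hinv⟩ := pvA_inner_eq K a hK rest (i+1) a popl invr
      have hi : ((i : Nat) : Int) ∉ popl' := by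
        rw [hlt _ (by push_cast; omega), h0]; exact hK
      have invr' : ∀ t (h : t < rest.length),
          (((i+1) + t : Nat) : Int) ∈ popl' ↔ pvKey rest[t] ∈ (pvKey a :: K) := by
        intro t h
        rw [hinv t h, List.mem_cons]
        tauto
      have hfil : List.filter (fun b => !decide (pvKey b ∈ K)) (a :: rest)
          = a :: List.filter (fun b => !decide (pvKey b ∈ K)) rest := by simp [hK]
      rw [show pvA_outer i (a :: rest) popl
            = pvB_fold a a (List.filter (fun b => !decide (pvKey b ∈ K)) rest)
              :: pvA_outer (i+1) rest popl' from by simp [pvA_outer, heq, hi], hfil,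
        ih (i+1) popl' (pvKey a :: K) invr']
      rw [arcs_cut_repeat_alt]
      congr 1
      rw [List.filter_filter]
      refine congrArg arcs_cut_repeat_alt (List.filter_congr ?_)
      intro b _
      by_cases h1 : pvKey b = pvKey a <;> by_cases h2 : pvKey b ∈ K <;>
        simp [h1, h2, pvB_same_eq, List.mem_cons]

-- ===== VERDICT (by name: the statement is the Claim_ definition above) =====
theorem arcs_cut_repeat_spec : Claim_equal_arcs_cut_repeat := by
  intro arcs _ _
  unfold Spec_arcs_cut_repeat arcs_cut_repeat
  rw [pvA_outer_eq arcs 0 [] [] (by intro t h; simp)]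
  congr 1
  simp
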